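-- pv_equiv track=rewrite | github.com/BuildSparkDevelopers/AI_NutriCurator | ai/agents/reco_agent.py | make_neighbors_symmetric
-- ===== SOURCE A (Python) =====
-- from typing import Dict, Any, List, Set, Optional, TypedDict
-- from typing import TypedDict, Any, Dict, Optional, List
--
-- def make_neighbors_symmetric(neighbors: Dict[str, List[str]]) -> Dict[str, List[str]]:
--     out = {k: list(v) for k, v in neighbors.items()}
--     for a, bs in neighbors.items():
--         for b in bs:
--             out.setdefault(b, [])
--             if a not in out[b]:
--                 out[b].append(a)
--     return out
-- ===== SOURCE B (Python) =====
-- def make_neighbors_symmetric(neighbors):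
--     # Gather per key: compute each key's final list directly instead of
--     # mutating a shared dict edge by edge.
--     items = list(neighbors.items())
--
--     def merged(b, base):
--         vals = list(base)
--         for a, bs in items:
--             if b in bs and a not in vals:
--                 vals.append(a)
--         return vals
--
--     out = {k: merged(k, v) for k, v in items}
--     extra = [b for b in dict.fromkeys(t for _, bs in items for t in bs)
--              if b not in neighbors]
--     for b in extra:
--         out[b] = merged(b, [])
--     return out
-- ===== Notes on version B (the rewrite author's own statement) =====
-- stated objective: alternative
-- what changed: B replaces A's scatter-style edge-by-edge mutation of a shared dict (setdefault + conditional append per edge) with a gather-style computation: each key's final list is computed directly by one scan of the items, and fresh target keys are collected up front by an ordered dedup of all targets.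
import Mathlib
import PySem

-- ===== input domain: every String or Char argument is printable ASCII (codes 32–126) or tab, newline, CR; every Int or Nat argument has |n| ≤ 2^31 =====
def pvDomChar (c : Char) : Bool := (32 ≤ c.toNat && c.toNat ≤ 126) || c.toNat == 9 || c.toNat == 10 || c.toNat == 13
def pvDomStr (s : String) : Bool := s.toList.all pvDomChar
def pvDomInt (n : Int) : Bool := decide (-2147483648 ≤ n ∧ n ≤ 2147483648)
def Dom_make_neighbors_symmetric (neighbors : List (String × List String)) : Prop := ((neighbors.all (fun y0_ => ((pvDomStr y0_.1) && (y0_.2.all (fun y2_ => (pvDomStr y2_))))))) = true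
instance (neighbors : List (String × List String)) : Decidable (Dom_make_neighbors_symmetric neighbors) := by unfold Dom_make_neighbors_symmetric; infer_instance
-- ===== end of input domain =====

-- B replaces A's edge-by-edge mutation of a shared dict by a per-key "gather" that
-- computes each key's final list directly (alternative decomposition, same cost class).

-- ===== PORT A =====
-- out = {k: list(v) for k, v in neighbors.items()}; then for each edge (a, b):
-- out.setdefault(b, []); if a not in out[b]: out[b].append(a)
def make_neighbors_symmetric (neighbors : List (String × List String)) : List (String × List String) :=
  let d : PySem.Dict String (List String) := PySem.Dict.ofList neighbors
  let out := d.items.foldl (fun o p =>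
    p.2.foldl (fun o b =>
      let o1 := o.setdefault b []
      if p.1 ∈ o1.getD b [] then o1 else o1.insert b (o1.getD b [] ++ [p.1])) o) d
  out.items

-- ===== PORT B =====
-- merged(b, base): scan all items once, appending each source a with b in bs, a not yet present
def pvMerged (items : List (String × List String)) (b : String) (base : List String) : List String :=
  items.foldl (fun vals p => if b ∈ p.2 ∧ p.1 ∉ vals then vals ++ [p.1] else vals) base

def make_neighbors_symmetric_alt (neighbors : List (String × List String)) : List (String × List String) :=
  let d : PySem.Dict String (List String) := PySem.Dict.ofList neighbors
  let items := d.items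
  -- extra = first occurrences of targets that are not keys (dict.fromkeys = dedup)
  let extra := (PySem.List.dedup (items.flatMap (fun p => p.2))).filter (fun b => !(d.contains b))
  -- {k: merged(k, v) …} over distinct keys, then out[b] = merged(b, []) appends fresh keys in order
  items.map (fun p => (p.1, pvMerged items p.1 p.2)) ++ extra.map (fun b => (b, pvMerged items b []))

-- ===== PRECONDITION & SPEC =====
def Spec_make_neighbors_symmetric (neighbors : List (String × List String)) (out : List (String × List String)) : Prop := out = make_neighbors_symmetric_alt neighbors
instance (neighbors : List (String × List String)) (out : List (String × List String)) : Decidable (Spec_make_neighbors_symmetric neighbors out) := by unfold Spec_make_neighbors_symmetric; infer_instance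

-- ===== CLAIM (what is proved, stated in full; the proofs are below) =====
def Claim_equal_make_neighbors_symmetric : Prop := ∀ (neighbors : List (String × List String)), Dom_make_neighbors_symmetric neighbors → Spec_make_neighbors_symmetric neighbors (make_neighbors_symmetric neighbors)

-- ===== LEMMAS AND PROOFS =====

-- A's per-edge step (e = (source, target)) and the per-value dedup-append step
def pvAStep (o : PySem.Dict String (List String)) (e : String × String) : PySem.Dict String (List String) :=
  let o1 := o.setdefault e.2 []
  if e.1 ∈ o1.getD e.2 [] then o1 else o1.insert e.2 (o1.getD e.2 [] ++ [e.1])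

def pvDStep (v : List String) (a : String) : List String := if a ∈ v then v else v ++ [a]

def pvEdges (items : List (String × List String)) : List (String × String) :=
  items.flatMap (fun p => p.2.map (fun b => (p.1, b)))

theorem pvA_eq_foldl_edges (d : PySem.Dict String (List String)) (items : List (String × List String)) :
    items.foldl (fun o p =>
      p.2.foldl (fun o b =>
        let o1 := o.setdefault b []
        if p.1 ∈ o1.getD b [] then o1 else o1.insert b (o1.getD b [] ++ [p.1])) o) d
    = (pvEdges items).foldl pvAStep d := by
  unfold pvEdges
  rw [List.foldl_flatMap]
  apply PySem.List.foldl_congr_mem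
  intro o p _
  rw [List.foldl_map]
  rfl

theorem pvGetD_aStep (o : PySem.Dict String (List String)) (e : String × String) (c : String) :
    (pvAStep o e).getD c [] = if e.2 = c then pvDStep (o.getD c []) e.1 else o.getD c [] := by
  unfold pvAStep pvDStep
  have hsd : ∀ c' : String, (o.setdefault e.2 []).getD c' [] = o.getD c' [] := by
    intro c'
    by_cases h : c' = e.2
    · subst h; exact PySem.Dict.getD_setdefault_self o e.2 [] []
    · rw [PySem.Dict.getD_eq_get?_getD, PySem.Dict.get?_setdefault_of_ne o [] h,
        ← PySem.Dict.getD_eq_get?_getD]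
  by_cases hm : e.1 ∈ (o.setdefault e.2 []).getD e.2 []
  · rw [if_pos hm, hsd]
    by_cases hc : e.2 = c
    · subst hc; rw [if_pos rfl, if_pos (by rwa [hsd] at hm)]
    · rw [if_neg hc]
  · rw [if_neg hm, PySem.Dict.getD_insert]
    by_cases hc : e.2 = c
    · subst hc; rw [if_pos rfl, if_pos rfl, hsd, if_neg (by rwa [hsd] at hm)]
    · rw [if_neg (fun h => hc h.symm), hsd, if_neg hc]

theorem pvKeys_aStep (o : PySem.Dict String (List String)) (e : String × String) :
    (pvAStep o e).keys = PySem.Set.add o.keys e.2 := by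
  unfold pvAStep
  have hk : (o.setdefault e.2 []).keys = PySem.Set.add o.keys e.2 := by
    rw [PySem.Dict.keys_setdefault, PySem.Set.add_eq_ite]
    by_cases h : o.contains e.2 = true
    · rw [if_pos h, if_pos ((PySem.Dict.contains_iff_mem_keys o e.2).mp h)]
    · rw [if_neg h, if_neg (fun hm => h ((PySem.Dict.contains_iff_mem_keys o e.2).mpr hm))]
  have hcont : (o.setdefault e.2 []).contains e.2 = true := by
    rw [PySem.Dict.contains_setdefault]; simp
  by_cases hm : e.1 ∈ (o.setdefault e.2 []).getD e.2 []
  · simp only [if_pos hm]; exact hk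
  · simp only [if_neg hm]
    rw [PySem.Dict.keys_insert_of_contains _ _ hcont]; exact hk

theorem pvKeys_foldl (es : List (String × String)) (o : PySem.Dict String (List String)) :
    (es.foldl pvAStep o).keys = PySem.Set.update o.keys (es.map (·.2)) := by
  induction es generalizing o with
  | nil => rfl
  | cons e t ih =>
    simp only [List.foldl_cons, List.map_cons]
    rw [ih, PySem.Set.update_cons, pvKeys_aStep]

theorem pvGetD_foldl (es : List (String × String)) (o : PySem.Dict String (List String)) (c : String) :
    (es.foldl pvAStep o).getD c [] =
      ((es.filter (fun e => e.2 = c)).map (·.1)).foldl pvDStep (o.getD c []) := by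
  induction es generalizing o with
  | nil => rfl
  | cons e t ih =>
    simp only [List.foldl_cons]
    rw [ih]
    by_cases hc : e.2 = c
    · rw [List.filter_cons_of_pos (by simpa using hc), List.map_cons, List.foldl_cons,
        pvGetD_aStep, if_pos hc]
    · rw [List.filter_cons_of_neg (by simpa using hc), pvGetD_aStep, if_neg hc]

theorem pvDStep_idem (v : List String) (a : String) : pvDStep (pvDStep v a) a = pvDStep v a := by
  unfold pvDStep
  by_cases h : a ∈ v
  · simp [h]
  · simp [h]

theorem pvFoldl_dstep_const (a : String) : ∀ (l : List String) (v : List String),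
    (∀ x ∈ l, x = a) → l.foldl pvDStep v = if l = [] then v else pvDStep v a := by
  intro l
  induction l with
  | nil => intro v _; simp
  | cons x t ih =>
    intro v h
    obtain rfl : x = a := h x (List.mem_cons_self)
    rw [List.foldl_cons, ih (pvDStep v x) (fun y hy => h y (List.mem_cons_of_mem _ hy))]
    rcases eq_or_ne t [] with rfl | ht
    · simp
    · rw [if_neg ht, pvDStep_idem, if_neg (List.cons_ne_nil x t)]

-- grouped per-key fold over the edge list equals B's single scan over the items
theorem pvMerged_eq (items : List (String × List String)) (c : String) (base : List String) :
    (((pvEdges items).filter (fun e => e.2 = c)).map (·.1)).foldl pvDStep base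
      = pvMerged items c base := by
  unfold pvEdges pvMerged
  rw [List.filter_flatMap, List.map_flatMap, List.foldl_flatMap]
  apply PySem.List.foldl_congr_mem
  intro v p _
  rw [List.filter_map, List.map_map]
  have hall : ∀ x ∈ (List.filter ((fun e => decide (e.2 = c)) ∘ fun b => (p.1, b)) p.2).map
      ((fun e => e.1) ∘ fun b => (p.1, b)), x = p.1 := by
    intro x hx
    simp only [List.mem_map, Function.comp] at hx
    obtain ⟨b, _, hb⟩ := hx
    exact hb.symm
  rw [pvFoldl_dstep_const p.1 _ v hall]
  by_cases hc : c ∈ p.2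
  · have hne : (List.filter ((fun e => decide (e.2 = c)) ∘ fun b => (p.1, b)) p.2).map
        ((fun e => e.1) ∘ fun b => (p.1, b)) ≠ [] := by
      simp only [ne_eq, List.map_eq_nil_iff, List.filter_eq_nil_iff, Function.comp, not_forall]
      exact ⟨c, hc, by simp⟩
    rw [if_neg hne]
    unfold pvDStep
    by_cases hm : p.1 ∈ v
    · rw [if_pos hm, if_neg (by simp [hm])]
    · rw [if_neg hm, if_pos ⟨hc, hm⟩]
  · have he : (List.filter ((fun e => decide (e.2 = c)) ∘ fun b => (p.1, b)) p.2).map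
        ((fun e => e.1) ∘ fun b => (p.1, b)) = [] := by
      simp only [List.map_eq_nil_iff, List.filter_eq_nil_iff, Function.comp]
      intro b hb
      simp only [decide_eq_true_eq]
      exact fun h => hc (h ▸ hb)
    rw [if_pos he, if_neg (by simp [hc])]

theorem pvEdges_map_snd (items : List (String × List String)) :
    (pvEdges items).map (·.2) = items.flatMap (fun p => p.2) := by
  unfold pvEdges
  rw [List.map_flatMap]
  simp [List.map_map]

-- ===== VERDICT (by name: the statement is the Claim_ definition above) =====
theorem make_neighbors_symmetric_spec : Claim_equal_make_neighbors_symmetric := by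
  intro neighbors _
  unfold Spec_make_neighbors_symmetric make_neighbors_symmetric make_neighbors_symmetric_alt
  dsimp only
  set d : PySem.Dict String (List String) := PySem.Dict.ofList neighbors with hd
  rw [pvA_eq_foldl_edges]
  set es := pvEdges d.items with hes
  have hndk : d.keys.Nodup := PySem.Dict.nodup_keys_ofList neighbors
  have hkeys : (es.foldl pvAStep d).keys = d.keys ++
      (PySem.Set.ofList (d.items.flatMap (fun p => p.2))).filter (fun y => !(PySem.Set.contains d.keys y)) := by
    rw [pvKeys_foldl, PySem.Set.update_eq_append_filter, hes, pvEdges_map_snd]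
  have hnout : (es.foldl pvAStep d).keys.Nodup := by
    rw [pvKeys_foldl]; exact PySem.Set.nodup_update _ _ hndk
  rw [PySem.Dict.items_eq_map_keys _ hnout [], hkeys, List.map_append]
  congr 1
  · -- original keys: d.keys = items.map (·.1); value at p.1 is pvMerged items p.1 p.2
    have hkm : d.keys = d.items.map (·.1) := rfl
    rw [hkm, List.map_map]
    refine List.map_congr_left ?_
    intro p hp
    obtain ⟨k, v⟩ := p
    simp only [Function.comp]
    congr 1
    rw [pvGetD_foldl, PySem.Dict.getD_of_mem_items d hp hndk, pvMerged_eq]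
  · -- fresh keys: dedup targets not already keys, value = pvMerged items b []
    have hfe : (PySem.Set.ofList (d.items.flatMap (fun p => p.2))).filter (fun y => !(PySem.Set.contains d.keys y))
        = (PySem.List.dedup (d.items.flatMap (fun p => p.2))).filter (fun b => !(d.contains b)) := by
      rw [PySem.List.dedup_eq_ofList]
      refine List.filter_congr ?_
      intro b _
      rw [PySem.Dict.contains_eq_decide_mem_keys]
      simp [PySem.Set.contains]
    rw [← hfe]
    refine List.map_congr_left ?_
    intro b hb
    have hbn : d.contains b = false := by
      have := List.of_mem_filter hb
      simp only [Bool.not_eq_true'] at this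
      rw [PySem.Dict.contains_eq_decide_mem_keys]
      simp only [PySem.Set.contains] at this
      simpa using this
    congr 1
    rw [pvGetD_foldl, PySem.Dict.getD_of_not_contains d [] hbn, pvMerged_eq]
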